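-- pv_equiv track=rewrite | github.com/Nghia03092004/nghia03092004.github.io | project_euler_unified/problem_615/solution.py | brute_force_factor_rich
-- ===== SOURCE A (Python) =====
-- def omega_with_mult(n: int):
--     """Compute Omega(n) = sum of exponents in prime factorization."""
--     count = 0
--     d = 2
--     while d * d <= n:
--         while n % d == 0:
--             count += 1
--             n //= d
--         d += 1
--     if n > 1:
--         count += 1
--     return count
--
-- def brute_force_factor_rich(K: int, M: int, limit: int = 10000):
--     """Find numbers with Omega(n) >= K by scanning, for verification."""
--     results = []
--     for n in range(2, limit + 1):
--         if omega_with_mult(n) >= K: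
--             results.append(n)
--             if len(results) == M:
--                 break
--     return results
-- ===== SOURCE B (Python) =====
-- def _sieve_scan(K, M, limit):
--     """Scan [2, limit] with a smallest-prime-factor sieve and Omega DP; stop at M results."""
--     spf = list(range(limit + 1))
--     i = 2
--     while i * i <= limit:
--         if spf[i] == i:
--             for j in range(i * i, limit + 1, i):
--                 if spf[j] == j:
--                     spf[j] = i
--         i += 1
--     omega = [0] * (limit + 1)
--     results = []
--     for n in range(2, limit + 1):
--         omega[n] = omega[n // spf[n]] + 1
--         if omega[n] >= K:
--             results.append(n)
--             if len(results) == M: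
--                 break
--     return results
--
-- def brute_force_factor_rich(K: int, M: int, limit: int = 10000):
--     """Find the first numbers with Omega(n) >= K via a doubling-cap SPF sieve."""
--     if limit < 2:
--         return []
--     cap = limit if limit < 1024 else 1024
--     while True:
--         results = _sieve_scan(K, M, cap)
--         if cap == limit or (0 < M and len(results) == M):
--             return results
--         cap = min(limit, 2 * cap)
-- ===== Notes on version B (the rewrite author's own statement) =====
-- stated objective: faster
-- what changed: Replaces per-number trial-division factor counting with a smallest-prime-factor sieve plus a linear DP omega[n]=omega[n//spf[n]]+1 and the same in-order scan with early break, run under a doubling cap so the sieve never extends far past the point where the M-th result is found.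
import Mathlib
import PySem

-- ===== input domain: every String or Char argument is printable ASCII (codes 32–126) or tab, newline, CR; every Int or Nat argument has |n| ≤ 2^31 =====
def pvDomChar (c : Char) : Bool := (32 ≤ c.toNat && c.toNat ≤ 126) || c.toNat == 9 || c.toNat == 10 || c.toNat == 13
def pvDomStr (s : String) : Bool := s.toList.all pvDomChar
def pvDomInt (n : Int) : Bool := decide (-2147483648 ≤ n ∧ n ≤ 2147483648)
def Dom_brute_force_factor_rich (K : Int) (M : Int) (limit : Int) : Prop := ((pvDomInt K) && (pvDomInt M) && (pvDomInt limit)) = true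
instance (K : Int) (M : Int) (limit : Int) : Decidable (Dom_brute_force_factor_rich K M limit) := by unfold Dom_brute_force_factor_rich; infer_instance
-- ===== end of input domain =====

-- B replaces A's per-number trial-division factor counting with a smallest-prime-factor
-- sieve plus a linear omega DP, then the same in-order scan with early break (objective: faster).

-- `n // d` for nonnegative arguments, as a Nat division (used by the ports' termination proofs)
theorem floordiv_toNat (n d : Int) (hn : 0 ≤ n) (hd : 0 < d) :
    PySem.Int.floordiv n d = ((n.toNat / d.toNat : Nat) : Int) := by
  have h1 : n = (n.toNat : Int) := (Int.toNat_of_nonneg hn).symm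
  have h2 : d = (d.toNat : Int) := (Int.toNat_of_nonneg hd.le).symm
  rw [h1, h2, PySem.Int.floordiv_natCast]
  simp only [Int.toNat_natCast]

-- ===== PORT A =====
-- inner loop of omega_with_mult: `while n % d == 0: count += 1; n //= d`
-- (the `2 ≤ d ∧ 0 < n` conjuncts only make the recursion total; they hold whenever A's code runs this loop)
def owmInner (n : Int) (d : Int) (count : Int) : Int × Int :=
  if h : 2 ≤ d ∧ 0 < n ∧ PySem.Int.mod n d = 0 then
    owmInner (PySem.Int.floordiv n d) d (count + 1)
  else (n, count)
termination_by n.toNat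
decreasing_by
  obtain ⟨hd, hn, -⟩ := h
  rw [floordiv_toNat n d (by omega) (by omega)]
  simp only [Int.toNat_natCast]
  exact Nat.div_lt_self (by omega) (by omega)

theorem owmInner_bounds (n d count : Int) :
    0 < n → 0 < (owmInner n d count).1 ∧ (owmInner n d count).1 ≤ n := by
  fun_induction owmInner n d count with
  | case1 n count hg ih =>
    intro hn
    have hd : 2 ≤ d := hg.1
    have hfd : PySem.Int.floordiv n d = ((n.toNat / d.toNat : Nat) : Int) :=
      floordiv_toNat n d (by omega) (by omega)
    have hdvd : d ∣ n := (PySem.Int.mod_eq_zero_iff_dvd n d).mp hg.2.2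
    have hdn : d ≤ n := Int.le_of_dvd hn hdvd
    have hpos : 0 < n.toNat / d.toNat := Nat.div_pos (by omega) (by omega)
    have hlt : n.toNat / d.toNat < n.toNat := Nat.div_lt_self (by omega) (by omega)
    have := ih (by rw [hfd]; exact_mod_cast hpos)
    refine ⟨this.1, le_trans this.2 ?_⟩
    rw [hfd, ← Int.toNat_of_nonneg (show (0:Int) ≤ n by omega)]
    exact_mod_cast hlt.le
  | case2 n count hg =>
    intro hn
    exact ⟨hn, le_refl n⟩

-- outer loop of omega_with_mult: `while d * d <= n:` body, then `if n > 1: count += 1`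
-- (the `2 ≤ d` conjunct only makes the recursion total; d starts at 2 and only grows)
def owmOuter (n : Int) (d : Int) (count : Int) : Int :=
  if h : d * d ≤ n ∧ 2 ≤ d then
    let p := owmInner n d count
    owmOuter p.1 (d + 1) p.2
  else if 1 < n then count + 1 else count
termination_by (n - d).toNat
decreasing_by
  obtain ⟨hdd, hd⟩ := h
  have hn : 0 < n := by nlinarith
  have hb := owmInner_bounds n d count hn
  have hdn : 2 * d ≤ n := by nlinarith
  have h1 := hb.1
  have h2 := hb.2
  omega

def omega_with_mult (n : Int) : Int := owmOuter n 2 0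

def bfALoop (K : Int) (M : Int) : List Int → List Int → List Int
  | [], acc => acc
  | n :: rest, acc =>
    if K ≤ omega_with_mult n then
      let acc' := acc ++ [n]
      if PySem.List.len acc' = M then acc' else bfALoop K M rest acc'
    else bfALoop K M rest acc

def brute_force_factor_rich (K : Int) (M : Int) (limit : Int) : List Int :=
  bfALoop K M (PySem.List.pyRange 2 (limit + 1) 1) []

-- ===== PORT B =====
-- sieve outer loop: `while i * i <= limit:` marking multiples of each unmarked i
-- (the `2 ≤ i` conjunct only makes the recursion total; i starts at 2 and only grows)
def sieveLoop (limit : Int) (i : Int) (spf : List Int) : List Int :=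
  if h : i * i ≤ limit ∧ 2 ≤ i then
    let spf' :=
      if PySem.List.pyGetD spf i 0 = i then
        (PySem.List.pyRange (i * i) (limit + 1) i).foldl
          (fun s j => if PySem.List.pyGetD s j 0 = j then PySem.List.pySetD s j i else s) spf
      else spf
    sieveLoop limit (i + 1) spf'
  else spf
termination_by (limit + 1 - i).toNat
decreasing_by
  obtain ⟨hii, hi⟩ := h
  have : 2 * i ≤ i * i := by nlinarith
  omega

-- main loop of B: fills omega[n] = omega[n // spf[n]] + 1 and collects, with early break
def bfBLoop (K : Int) (M : Int) (spf : List Int) : List Int → List Int → List Int → List Int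
  | [], _, acc => acc
  | n :: rest, om, acc =>
    let v := PySem.List.pyGetD om (PySem.Int.floordiv n (PySem.List.pyGetD spf n 0)) 0 + 1
    let om' := PySem.List.pySetD om n v
    if K ≤ v then
      let acc' := acc ++ [n]
      if PySem.List.len acc' = M then acc' else bfBLoop K M spf rest om' acc'
    else bfBLoop K M spf rest om' acc

-- one sieve-and-scan pass of B up to `limit` (= _sieve_scan in Source B)
def sieveScan (K : Int) (M : Int) (limit : Int) : List Int :=
  let spf := sieveLoop limit 2 (PySem.List.pyRange 0 (limit + 1) 1)
  bfBLoop K M spf (PySem.List.pyRange 2 (limit + 1) 1)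
    (List.replicate (limit + 1).toNat 0) []

-- doubling-cap driver of B (= the `while True` loop in Source B); the `cap < limit ∧ 0 < cap`
-- conjuncts only make the recursion total: they hold on every cap the Python loop reaches
def capLoop (K : Int) (M : Int) (limit : Int) (cap : Int) : List Int :=
  let res := sieveScan K M cap
  if h : cap < limit ∧ 0 < cap ∧ ¬ (cap = limit ∨ (0 < M ∧ PySem.List.len res = M)) then
    capLoop K M limit (min limit (2 * cap))
  else res
termination_by (limit - cap).toNat
decreasing_by
  obtain ⟨h1, h2, -⟩ := h
  have : cap < min limit (2 * cap) := by omega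
  omega

def brute_force_factor_rich_alt (K : Int) (M : Int) (limit : Int) : List Int :=
  if limit < 2 then []
  else capLoop K M limit (if limit < 1024 then limit else 1024)

-- ===== PRECONDITION & SPEC =====
def Spec_brute_force_factor_rich (K : Int) (M : Int) (limit : Int) (out : List Int) : Prop := out = brute_force_factor_rich_alt K M limit
instance (K : Int) (M : Int) (limit : Int) (out : List Int) : Decidable (Spec_brute_force_factor_rich K M limit out) := by unfold Spec_brute_force_factor_rich; infer_instance

-- ===== CLAIM (what is proved, stated in full; the proofs are below) =====
def Claim_equal_brute_force_factor_rich : Prop := ∀ (K : Int) (M : Int) (limit : Int), Dom_brute_force_factor_rich K M limit → Spec_brute_force_factor_rich K M limit (brute_force_factor_rich K M limit)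

-- ===== LEMMAS AND PROOFS =====

-- Ω(n), number of prime factors with multiplicity, as a recursive reference function on Nat
def OmegaN (n : Nat) : Nat :=
  if h : n ≤ 1 then 0
  else OmegaN (n / n.minFac) + 1
termination_by n
decreasing_by
  exact Nat.div_lt_self (by omega) (Nat.minFac_prime (by omega)).two_le

theorem OmegaN_le_one (n : Nat) (h : n ≤ 1) : OmegaN n = 0 := by
  rw [OmegaN]; simp [h]

theorem OmegaN_step (n : Nat) (h : 2 ≤ n) : OmegaN n = OmegaN (n / n.minFac) + 1 := by
  rw [OmegaN]; simp [show ¬ n ≤ 1 by omega]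

-- a composite number is at least the square of its least prime factor
theorem minFac_sq_le (j : Nat) (h2 : 2 ≤ j) (hne : j.minFac ≠ j) :
    j.minFac * j.minFac ≤ j := by
  have hdvd : j.minFac ∣ j := Nat.minFac_dvd j
  have hp2 : 2 ≤ j.minFac := (Nat.minFac_prime (by omega)).two_le
  have hcd : (j / j.minFac) ∣ j := Nat.div_dvd_of_dvd hdvd
  have hmul : j.minFac * (j / j.minFac) = j := Nat.mul_div_cancel' hdvd
  have hc2 : 2 ≤ j / j.minFac := by
    rcases Nat.lt_or_ge (j / j.minFac) 2 with h | h
    · interval_cases h' : (j / j.minFac) <;> omega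
    · exact h
  have := Nat.minFac_le_of_dvd hc2 hcd
  calc j.minFac * j.minFac ≤ j.minFac * (j / j.minFac) :=
        Nat.mul_le_mul_left _ this
    _ = j := hmul

theorem owmInner_spec (n d count : Int) (hd : 2 ≤ d) :
    0 < n → (∀ m : Int, 2 ≤ m → m < d → ¬ m ∣ n) →
    ¬ d ∣ (owmInner n d count).1 ∧
    0 < (owmInner n d count).1 ∧
    (∀ m : Int, 2 ≤ m → m < d → ¬ m ∣ (owmInner n d count).1) ∧
    (owmInner n d count).2 + (OmegaN (owmInner n d count).1.toNat : Int)
      = count + (OmegaN n.toNat : Int) := by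
  fun_induction owmInner n d count with
  | case1 n count hg ih =>
    intro hn hmin
    have hdd : 2 ≤ d := hg.1
    have hdvd : d ∣ n := (PySem.Int.mod_eq_zero_iff_dvd n d).mp hg.2.2
    have hdn : d ≤ n := Int.le_of_dvd hn hdvd
    have hfd : PySem.Int.floordiv n d = ((n.toNat / d.toNat : Nat) : Int) :=
      floordiv_toNat n d (by omega) (by omega)
    -- Nat facts
    have hq : d.toNat ∣ n.toNat := by
      have : (d.toNat : Int) ∣ (n.toNat : Int) := by
        rwa [Int.toNat_of_nonneg (by omega : (0:Int) ≤ d), Int.toNat_of_nonneg (by omega : (0:Int) ≤ n)]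
      exact_mod_cast this
    have hminfac : n.toNat.minFac = d.toNat := by
      have hle : n.toNat.minFac ≤ d.toNat := Nat.minFac_le_of_dvd (by omega) hq
      rcases Nat.lt_or_ge n.toNat.minFac d.toNat with hlt | hge
      · exfalso
        have hprime := Nat.minFac_prime (show n.toNat ≠ 1 by omega)
        have hmdvd : (n.toNat.minFac : Int) ∣ n := by
          have : (n.toNat.minFac : Int) ∣ (n.toNat : Int) := Int.natCast_dvd_natCast.mpr (Nat.minFac_dvd _)
          rwa [Int.toNat_of_nonneg (by omega : (0:Int) ≤ n)] at this
        exact hmin (n.toNat.minFac : Int) (by exact_mod_cast hprime.two_le) (by omega) hmdvd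
      · omega
    have hstep : OmegaN n.toNat = OmegaN (n.toNat / d.toNat) + 1 := by
      rw [OmegaN_step n.toNat (by omega), hminfac]
    -- new n
    have hpos : 0 < n.toNat / d.toNat := Nat.div_pos (by omega) (by omega)
    have hn' : 0 < PySem.Int.floordiv n d := by rw [hfd]; exact_mod_cast hpos
    have hdivdvd : PySem.Int.floordiv n d ∣ n := by
      rw [hfd]
      have : (n.toNat / d.toNat) ∣ n.toNat := Nat.div_dvd_of_dvd hq
      have h2 : ((n.toNat / d.toNat : Nat) : Int) ∣ (n.toNat : Int) := Int.natCast_dvd_natCast.mpr this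
      rwa [Int.toNat_of_nonneg (by omega : (0:Int) ≤ n)] at h2
    have hmin' : ∀ m : Int, 2 ≤ m → m < d → ¬ m ∣ PySem.Int.floordiv n d := by
      intro m h1 h2 hm
      exact hmin m h1 h2 (hm.trans hdivdvd)
    obtain ⟨c1, c2, c3, c4⟩ := ih hn' hmin'
    refine ⟨c1, c2, c3, ?_⟩
    have ht : (PySem.Int.floordiv n d).toNat = n.toNat / d.toNat := by
      rw [hfd, Int.toNat_natCast]
    rw [c4, ht, hstep]
    push_cast
    ring
  | case2 n count hg =>
    intro hn hmin
    have hnd : ¬ d ∣ n := by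
      intro hdvd
      exact hg ⟨hd, hn, (PySem.Int.mod_eq_zero_iff_dvd n d).mpr hdvd⟩
    exact ⟨hnd, hn, hmin, by simp⟩

theorem owmOuter_spec (n d count : Int) :
    2 ≤ d → 0 < n → (∀ m : Int, 2 ≤ m → m < d → ¬ m ∣ n) →
    owmOuter n d count = count + (OmegaN n.toNat : Int) := by
  fun_induction owmOuter n d count with
  | case1 n d count hg p ih =>
    intro hd hn hmin
    obtain ⟨c1, c2, c3, c4⟩ := owmInner_spec n d count hd hn hmin
    have hmin' : ∀ m : Int, 2 ≤ m → m < d + 1 → ¬ m ∣ (owmInner n d count).1 := by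
      intro m h1 h2 hm
      rcases eq_or_lt_of_le (show m ≤ d by omega) with rfl | hlt
      · exact c1 hm
      · exact c3 m h1 hlt hm
    have := ih (by omega) c2 hmin'
    show owmOuter (owmInner n d count).1 (d+1) (owmInner n d count).2 = _
    rw [this]
    omega
  | case2 n d count hg h1 =>
    intro hd hn hmin
    have hnd : n < d * d := by
      rcases not_and_or.mp hg with h | h
      · omega
      · omega
    -- here n has no divisor below d and n < d*d, so n is prime and Ω n = 1
    have ha2 : 2 ≤ n.toNat := by omega
    have hmf : n.toNat.minFac = n.toNat := by
      by_contra hne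
      set m := n.toNat.minFac with hm
      have hprime := Nat.minFac_prime (show n.toNat ≠ 1 by omega)
      have hdvd : m ∣ n.toNat := Nat.minFac_dvd _
      have hsq : m * m ≤ n.toNat := minFac_sq_le n.toNat ha2 hne
      have hmd : d.toNat ≤ m := by
        by_contra hlt
        have hmdvd : (m : Int) ∣ n := by
          have : (m : Int) ∣ (n.toNat : Int) := Int.natCast_dvd_natCast.mpr hdvd
          rwa [Int.toNat_of_nonneg (by omega : (0:Int) ≤ n)] at this
        exact hmin (m : Int) (by exact_mod_cast hprime.two_le) (by omega) hmdvd
      have hcast : (d.toNat : Int) = d := Int.toNat_of_nonneg (by omega)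
      have hbig : (d * d : Int) ≤ (n.toNat : Int) := by
        calc (d * d : Int) = ((d.toNat * d.toNat : Nat) : Int) := by push_cast [hcast]; ring
          _ ≤ ((m * m : Nat) : Int) := by exact_mod_cast Nat.mul_le_mul hmd hmd
          _ ≤ ((n.toNat : Nat) : Int) := by exact_mod_cast hsq
      rw [Int.toNat_of_nonneg (by omega : (0:Int) ≤ n)] at hbig
      omega
    have hΩ : OmegaN n.toNat = 1 := by
      rw [OmegaN_step n.toNat ha2, hmf, Nat.div_self (by omega), OmegaN_le_one 1 (by omega)]
    rw [hΩ]
    omega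
  | case3 n d count hg h1 =>
    intro hd hn hmin
    have hΩ : OmegaN n.toNat = 0 := OmegaN_le_one n.toNat (by omega)
    rw [hΩ]
    omega

theorem omega_with_mult_eq (n : Int) (hn : 0 < n) :
    omega_with_mult n = (OmegaN n.toNat : Int) := by
  have := owmOuter_spec n 2 0 (by omega) hn (by intro m h1 h2; omega)
  simpa [omega_with_mult] using this

-- effect of the inner marking fold of the sieve
theorem markFold_spec (i : Int) (hi : 2 ≤ i) (js : List Int) :
    ∀ spf : List Int, (∀ j ∈ js, i < j ∧ 0 ≤ j ∧ j < (spf.length : Int)) →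
    (js.foldl (fun s j => if PySem.List.pyGetD s j 0 = j then PySem.List.pySetD s j i else s) spf).length = spf.length ∧
    ∀ m : Nat, m < spf.length →
      PySem.List.pyGetD (js.foldl (fun s j => if PySem.List.pyGetD s j 0 = j then PySem.List.pySetD s j i else s) spf) (m : Int) 0
        = if (m : Int) ∈ js ∧ PySem.List.pyGetD spf (m : Int) 0 = (m : Int) then i
          else PySem.List.pyGetD spf (m : Int) 0 := by
  induction js with
  | nil =>
    intro spf _
    refine ⟨rfl, ?_⟩
    intro m hm
    simp
  | cons j rest ih =>
    intro spf hb
    obtain ⟨hji, hj0, hjlen⟩ := hb j (List.mem_cons_self)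
    have hset : ∀ s : List Int, (if PySem.List.pyGetD s j 0 = j then PySem.List.pySetD s j i else s).length = s.length := by
      intro s
      split
      · rw [PySem.List.pySetD_of_nonneg _ _ hj0]; simp
      · rfl
    set s1 := if PySem.List.pyGetD spf j 0 = j then PySem.List.pySetD spf j i else spf with hs1
    have hlen1 : s1.length = spf.length := hset spf
    have hb' : ∀ x ∈ rest, i < x ∧ 0 ≤ x ∧ x < (s1.length : Int) := by
      intro x hx
      have := hb x (List.mem_cons_of_mem _ hx)
      rw [hlen1]; exact this
    obtain ⟨ihl, ihv⟩ := ih s1 hb'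
    simp only [List.foldl_cons]
    rw [← hs1]
    refine ⟨by rw [ihl, hlen1], ?_⟩
    intro m hm
    rw [ihv m (by rw [hlen1]; exact hm)]
    by_cases hmj : (m : Int) = j
    · -- index j itself
      by_cases hsp : PySem.List.pyGetD spf j 0 = j
      · have hs1j : PySem.List.pyGetD s1 (m : Int) 0 = i := by
          rw [hs1, if_pos hsp, ← hmj, PySem.List.pySetD_of_nonneg _ _ (by omega), PySem.List.pyGetD_natCast]
          have h1 : ((m : Int).toNat) = m := by omega
          rw [h1, List.getD, List.getElem?_set_self (by omega)]
          rfl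
        rw [if_neg (by rintro ⟨-, hc⟩; rw [hs1j] at hc; omega),
          if_pos ⟨by rw [hmj]; exact List.mem_cons_self, by rw [hmj]; exact hsp⟩, hs1j]
      · have hs1e : s1 = spf := by rw [hs1, if_neg hsp]
        rw [hs1e]
        have hcond : ¬ ((m : Int) ∈ j :: rest ∧ PySem.List.pyGetD spf (m : Int) 0 = (m : Int)) → True := fun _ => trivial
        by_cases hrest : (m : Int) ∈ rest ∧ PySem.List.pyGetD spf (m : Int) 0 = (m : Int)
        · rw [if_pos hrest, if_pos ⟨List.mem_cons_of_mem _ hrest.1, hrest.2⟩]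
        · rw [if_neg hrest, if_neg (by
            intro hc
            rcases List.mem_cons.mp hc.1 with h | h
            · exact hsp (by rw [← hmj] at *; exact hc.2)
            · exact hrest ⟨h, hc.2⟩)]
    · -- other indices untouched by this step
      have hs1m : PySem.List.pyGetD s1 (m : Int) 0 = PySem.List.pyGetD spf (m : Int) 0 := by
        rw [hs1]
        split
        · rw [PySem.List.pySetD_of_nonneg _ _ hj0, PySem.List.pyGetD_natCast, PySem.List.pyGetD_natCast,
            List.getD, List.getD, List.getElem?_set_ne (by omega)]
        · rfl
      rw [hs1m]
      by_cases hrest : (m : Int) ∈ rest ∧ PySem.List.pyGetD spf (m : Int) 0 = (m : Int)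
      · rw [if_pos hrest, if_pos ⟨List.mem_cons_of_mem _ hrest.1, hrest.2⟩]
      · rw [if_neg hrest, if_neg (by
          intro hc
          rcases List.mem_cons.mp hc.1 with h | h
          · exact hmj h
          · exact hrest ⟨h, hc.2⟩)]

-- j.minFac = i exactly characterises membership of j in the marking progression of round i,
-- among indices that are still unmarked (three small arithmetic facts used by the invariant step)
theorem minFac_eq_of_dvd_of_le (j I : Nat) (h2 : 2 ≤ j) (hI : 2 ≤ I) (hdvd : I ∣ j)
    (hge : I ≤ j.minFac) : j.minFac = I :=
  le_antisymm (Nat.minFac_le_of_dvd hI hdvd) hge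

theorem sq_le_of_minFac_eq (j I : Nat) (h2 : 2 ≤ j) (hI : 2 ≤ I) (hdvd : I ∣ j)
    (hne : j ≠ I) (hmf : j.minFac = I) : I * I ≤ j := by
  have hm : j / I ∣ j := Nat.div_dvd_of_dvd hdvd
  have hmul : I * (j / I) = j := Nat.mul_div_cancel' hdvd
  have hm2 : 2 ≤ j / I := by
    rcases Nat.lt_or_ge (j / I) 2 with h | h
    · interval_cases h' : (j / I) <;> omega
    · exact h
  have : j.minFac ≤ j / I := Nat.minFac_le_of_dvd hm2 hm
  calc I * I ≤ I * (j / I) := Nat.mul_le_mul_left _ (by omega)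
    _ = j := hmul

-- when the loop stops (limit < i*i), the invariant already pins every entry to minFac
theorem sieveStop (limit : Int) (i : Int) (spf : List Int) (hi2 : 0 ≤ i) (hlim : limit < i * i)
    (hlen : spf.length = (limit + 1).toNat)
    (hinv : ∀ j : Nat, j < spf.length → PySem.List.pyGetD spf (j : Int) 0 =
       (if 2 ≤ j ∧ j.minFac < i.toNat ∧ j.minFac ≠ j then (j.minFac : Int) else (j : Int))) :
    ∀ j : Nat, 2 ≤ j → (j : Int) ≤ limit →
      PySem.List.pyGetD spf (j : Int) 0 = (j.minFac : Int) := by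
  intro j h2j hjl
  have hjlen : j < spf.length := by
    have : (j : Int) < limit + 1 := by omega
    omega
  rw [hinv j hjlen]
  by_cases hpj : j.minFac = j
  · rw [if_neg (by rintro ⟨-, -, hc⟩; exact hc hpj), hpj]
  · have hsq := minFac_sq_le j h2j hpj
    have hplt : j.minFac < i.toNat := by
      by_contra hge
      have h1 : i * i ≤ ((j.minFac * j.minFac : Nat) : Int) := by
        have h0 : i.toNat * i.toNat ≤ j.minFac * j.minFac :=
          Nat.mul_le_mul (by omega) (by omega)
        calc i * i = ((i.toNat * i.toNat : Nat) : Int) := by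
              push_cast [Int.toNat_of_nonneg hi2]; ring
          _ ≤ _ := by exact_mod_cast h0
      have h2 : ((j.minFac * j.minFac : Nat) : Int) ≤ (j : Int) := by exact_mod_cast hsq
      omega
    rw [if_pos ⟨h2j, hplt, hpj⟩]

-- sieve invariant: after all rounds < i, entry j holds minFac j exactly when minFac j < i and j is composite
theorem sieveLoop_spec_fuel (limit : Int) : ∀ (fuel : Nat) (i : Int) (spf : List Int),
    (limit + 1 - i).toNat ≤ fuel → 2 ≤ i → spf.length = (limit + 1).toNat →
    (∀ j : Nat, j < spf.length → PySem.List.pyGetD spf (j : Int) 0 =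
       (if 2 ≤ j ∧ j.minFac < i.toNat ∧ j.minFac ≠ j then (j.minFac : Int) else (j : Int))) →
    ∀ j : Nat, 2 ≤ j → (j : Int) ≤ limit →
      PySem.List.pyGetD (sieveLoop limit i spf) (j : Int) 0 = (j.minFac : Int) := by
  intro fuel
  induction fuel with
  | zero =>
    intro i spf hfuel hi hlen hinv
    have hstop : ¬ (i * i ≤ limit ∧ 2 ≤ i) := by
      rintro ⟨hii, -⟩
      have : 2 * i ≤ i * i := by nlinarith
      omega
    rw [sieveLoop, dif_neg hstop]
    exact sieveStop limit i spf (by omega) (by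
      rcases not_and_or.mp hstop with h | h
      · omega
      · omega) hlen hinv
  | succ fuel ih =>
    intro i spf hfuel hi hlen hinv
    by_cases hg : i * i ≤ limit ∧ 2 ≤ i
    case neg =>
      rw [sieveLoop, dif_neg hg]
      exact sieveStop limit i spf (by omega) (by
        rcases not_and_or.mp hg with h | h
        · omega
        · omega) hlen hinv
    case pos =>
      obtain ⟨hii, -⟩ := hg
      have hil : i ≤ limit := by nlinarith
      rw [sieveLoop, dif_pos ⟨hii, hi⟩]
      set spf' := (if PySem.List.pyGetD spf i 0 = i then
          (PySem.List.pyRange (i * i) (limit + 1) i).foldl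
            (fun s j => if PySem.List.pyGetD s j 0 = j then PySem.List.pySetD s j i else s) spf
        else spf) with hspf'
      have hIc : ((i.toNat : Nat) : Int) = i := Int.toNat_of_nonneg (by omega)
      have hI2 : 2 ≤ i.toNat := by omega
      have hlenI : (spf.length : Int) = limit + 1 := by rw [hlen]; omega
      have hlen' : spf'.length = (limit + 1).toNat := by
        rw [hspf']
        split
        · rename_i hcond
          rw [(markFold_spec i (by omega) (PySem.List.pyRange (i * i) (limit + 1) i) spf (by
              intro x hx
              rw [PySem.List.mem_pyRange_iff_of_pos (by omega)] at hx
              refine ⟨by nlinarith, by nlinarith, by omega⟩)).1, hlen]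
        · exact hlen
      have hinv' : ∀ j : Nat, j < spf'.length → PySem.List.pyGetD spf' (j : Int) 0 =
          (if 2 ≤ j ∧ j.minFac < (i+1).toNat ∧ j.minFac ≠ j then (j.minFac : Int) else (j : Int)) := by
        by_cases hcond : PySem.List.pyGetD spf i 0 = i
        · -- i is unmarked, hence prime: this round records i as least factor of its composite multiples
          have hiprime : i.toNat.minFac = i.toNat := by
            have h1 := hinv i.toNat (by omega)
            rw [hIc] at h1
            rw [h1] at hcond
            split at hcond
            · rename_i hc
              exfalso
              have : (i.toNat.minFac : Int) = ((i.toNat : Nat) : Int) := by rw [hcond, hIc]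
              exact hc.2.2 (by exact_mod_cast this)
            · rename_i hc
              have := Nat.minFac_le (show 0 < i.toNat by omega)
              omega
          obtain ⟨hmlen, hmval⟩ := markFold_spec i (by omega)
            (PySem.List.pyRange (i * i) (limit + 1) i) spf (by
              intro x hx
              rw [PySem.List.mem_pyRange_iff_of_pos (by omega)] at hx
              refine ⟨by nlinarith, by nlinarith, by omega⟩)
          have hspf'_def : spf' = (PySem.List.pyRange (i * i) (limit + 1) i).foldl
              (fun s j => if PySem.List.pyGetD s j 0 = j then PySem.List.pySetD s j i else s) spf := by
            rw [hspf', if_pos hcond]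
          intro j hj
          have hjlen : j < spf.length := by rw [hspf'_def, hmlen] at hj; exact hj
          have hjlim : (j : Int) ≤ limit := by
            have : (j : Int) < (spf.length : Int) := by exact_mod_cast hjlen
            omega
          rw [hspf'_def, hmval j hjlen]
          have hmem : ((j : Int) ∈ PySem.List.pyRange (i * i) (limit + 1) i)
              ↔ (i * i ≤ (j : Int) ∧ i ∣ (j : Int)) := by
            rw [PySem.List.mem_pyRange_iff_of_pos (by omega)]
            constructor
            · rintro ⟨h1, h2, h3⟩
              have h4 : i ∣ ((j : Int) - i * i) + i * i := dvd_add h3 ⟨i, rfl⟩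
              refine ⟨h1, by simpa using h4⟩
            · rintro ⟨h1, h2⟩
              exact ⟨h1, by omega, dvd_sub h2 ⟨i, rfl⟩⟩
          have hold := hinv j hjlen
          by_cases h2j : 2 ≤ j
          case neg =>
            -- j < 2 is never touched (indices in the progression are ≥ i*i ≥ 4)
            rw [if_neg (by
                rintro ⟨hm, -⟩
                rw [hmem] at hm
                have h4 : (4:Int) ≤ i * i := by nlinarith
                have hj1 : (j : Int) ≤ 1 := by omega
                linarith [hm.1]),
              hold, if_neg (by omega)]
            try rw [if_neg (by omega)]
          case pos =>
            have hjne1 : j ≠ 1 := by omega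
            have hpprime := Nat.minFac_prime hjne1
            have hpdvd := Nat.minFac_dvd j
            rcases Nat.lt_or_ge j.minFac i.toNat with ha | hb
            · -- least factor already below i: either already recorded, or j is a small prime
              by_cases hpj : j.minFac = j
              · -- j is a prime < i: untouched, stays j
                have hjlt : (j : Int) < i := by
                  have hc1 : (j.minFac : Int) < ((i.toNat : Nat) : Int) := by exact_mod_cast ha
                  rw [hIc] at hc1
                  have : j.minFac = j := hpj
                  omega
                rw [if_neg (by
                    rintro ⟨hm, -⟩
                    rw [hmem] at hm
                    have h5 : i * i ≤ (j : Int) := hm.1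
                    nlinarith),
                  hold, if_neg (by omega)]
                try rw [if_neg (by omega)]
              · -- composite with recorded factor: spf[j] = minFac j ≠ j, untouched
                have hvalj : PySem.List.pyGetD spf (j : Int) 0 = (j.minFac : Int) := by
                  rw [hold, if_pos ⟨h2j, ha, hpj⟩]
                rw [if_neg (by
                    rintro ⟨-, hc⟩
                    rw [hvalj] at hc
                    exact hpj (by exact_mod_cast hc)),
                  hvalj, if_pos ⟨h2j, by omega, hpj⟩]
            · -- least factor ≥ i: entry still j; marked now iff i ∣ j and j ≠ i
              have holdj : PySem.List.pyGetD spf (j : Int) 0 = (j : Int) := by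
                rw [hold, if_neg (by omega)]
              rcases Classical.em (i ∣ (j : Int)) with hdvd | hndvd
              · have hdvdN : i.toNat ∣ j := by
                  have hc1 : ((i.toNat : Nat) : Int) ∣ ((j : Nat) : Int) := by rw [hIc]; exact hdvd
                  exact_mod_cast hc1
                have hmfi : j.minFac = i.toNat := minFac_eq_of_dvd_of_le j i.toNat h2j hI2 hdvdN hb
                by_cases hji : j = i.toNat
                · -- j = i itself: not in the progression (i < i*i); prime, stays i
                  have hje : (j : Int) = i := by rw [hji, hIc]
                  rw [if_neg (by
                      rintro ⟨hm, -⟩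
                      rw [hmem] at hm
                      have h5 : i * i ≤ (j : Int) := hm.1
                      nlinarith),
                    holdj, if_neg (by
                      rintro ⟨-, -, hc⟩
                      rw [hji] at hc
                      exact hc hiprime)]
                · -- composite multiple of i: j ≥ i*i, gets marked with i
                  have hsq : i.toNat * i.toNat ≤ j := sq_le_of_minFac_eq j i.toNat h2j hI2 hdvdN hji hmfi
                  have hmemj : (j : Int) ∈ PySem.List.pyRange (i * i) (limit + 1) i := by
                    rw [hmem]
                    refine ⟨?_, hdvd⟩
                    calc i * i = ((i.toNat * i.toNat : Nat) : Int) := by push_cast [hIc]; ring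
                      _ ≤ (j : Int) := by exact_mod_cast hsq
                  rw [if_pos ⟨hmemj, holdj⟩, if_pos ⟨h2j, by omega, by omega⟩, hmfi, hIc]
              · -- not a multiple of i: untouched, and minFac j cannot be i
                rw [if_neg (by rintro ⟨hm, -⟩; rw [hmem] at hm; exact hndvd hm.2),
                  holdj, if_neg (by
                    rintro ⟨-, hc1, hc2⟩
                    have hni : j.minFac ≠ i.toNat := by
                      intro hc
                      apply hndvd
                      have : ((i.toNat : Nat) : Int) ∣ ((j : Nat) : Int) :=
                        Int.natCast_dvd_natCast.mpr (hc ▸ hpdvd)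
                      rwa [hIc] at this
                    have := Nat.minFac_le (show 0 < j by omega)
                    omega)]
        · -- i is already marked, hence composite: no prime has least factor i, invariant carries over
          have hicomp : i.toNat.minFac < i.toNat ∧ i.toNat.minFac ≠ i.toNat := by
            have h1 := hinv i.toNat (by omega)
            rw [hIc] at h1
            split at h1
            · rename_i hc
              exact ⟨hc.2.1, hc.2.2⟩
            · exact absurd h1 hcond
          have hspf'_def : spf' = spf := by rw [hspf', if_neg hcond]
          intro j hj
          rw [hspf'_def] at hj ⊢
          rw [hinv j hj]
          by_cases h2j : 2 ≤ j
          · have hni : j.minFac ≠ i.toNat := by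
              intro hc
              have hpprime := Nat.minFac_prime (show j ≠ 1 by omega)
              rw [hc] at hpprime
              have := hpprime.minFac_eq
              omega
            by_cases hcnd : j.minFac < i.toNat ∧ j.minFac ≠ j
            · rw [if_pos ⟨h2j, hcnd.1, hcnd.2⟩, if_pos ⟨h2j, by omega, hcnd.2⟩]
            · rw [if_neg (by rintro ⟨-, hc1, hc2⟩; exact hcnd ⟨by omega, hc2⟩),
                if_neg (by rintro ⟨-, hc1, hc2⟩; exact hcnd ⟨by omega, hc2⟩)]
          · rw [if_neg (by omega), if_neg (by omega)]
      exact ih (i + 1) spf' (by omega) (by omega) hlen' hinv'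

theorem sieveLoop_spec (limit : Int) (i : Int) (spf : List Int) :
    2 ≤ i → spf.length = (limit + 1).toNat →
    (∀ j : Nat, j < spf.length → PySem.List.pyGetD spf (j : Int) 0 =
       (if 2 ≤ j ∧ j.minFac < i.toNat ∧ j.minFac ≠ j then (j.minFac : Int) else (j : Int))) →
    ∀ j : Nat, 2 ≤ j → (j : Int) ≤ limit →
      PySem.List.pyGetD (sieveLoop limit i spf) (j : Int) 0 = (j.minFac : Int) := by
  intro hi hlen hinv
  exact sieveLoop_spec_fuel limit (limit + 1 - i).toNat i spf (le_refl _) hi hlen hinv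

theorem bfLoop_eq (K M limit : Int) (spf : List Int)
    (hl : 2 ≤ limit)
    (hspf : ∀ j : Nat, 2 ≤ j → (j : Int) ≤ limit →
      PySem.List.pyGetD spf (j : Int) 0 = (j.minFac : Int)) :
    ∀ (fuel : Nat) (n : Nat) (om acc : List Int), 2 ≤ n → (limit + 1 - n).toNat ≤ fuel →
    om.length = (limit + 1).toNat →
    (∀ m : Nat, m < n → PySem.List.pyGetD om (m : Int) 0 = (OmegaN m : Int)) →
    bfALoop K M (PySem.List.pyRange (n : Int) (limit + 1) 1) acc
      = bfBLoop K M spf (PySem.List.pyRange (n : Int) (limit + 1) 1) om acc := by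
  intro fuel
  induction fuel with
  | zero =>
    intro n om acc hn hfuel hlen hval
    rw [PySem.List.pyRange_one_eq_nil (by omega)]
    rfl
  | succ fuel ih =>
    intro n om acc hn hfuel hlen hval
    by_cases hend : limit + 1 ≤ (n : Int)
    · rw [PySem.List.pyRange_one_eq_nil hend]
      rfl
    · have hnl : (n : Int) ≤ limit := by omega
      rw [PySem.List.pyRange_one_cons (by omega)]
      simp only [bfALoop, bfBLoop]
      have hmf2 : 2 ≤ n.minFac := (Nat.minFac_prime (show n ≠ 1 by omega)).two_le
      have hdiv : n / n.minFac < n := Nat.div_lt_self (by omega) hmf2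
      have hvv : PySem.List.pyGetD om
          (PySem.Int.floordiv (n : Int) (PySem.List.pyGetD spf (n : Int) 0)) 0 + 1
          = (OmegaN n : Int) := by
        rw [hspf n hn hnl, PySem.Int.floordiv_natCast, hval (n / n.minFac) hdiv,
          OmegaN_step n (by omega)]
        push_cast
        ring
      have hA : omega_with_mult (n : Int) = (OmegaN n : Int) := by
        rw [omega_with_mult_eq (n : Int) (by exact_mod_cast Nat.lt_of_lt_of_le Nat.zero_lt_two hn)]
        simp
      rw [hvv, hA]
      have hrec : ((n : Int) + 1) = ((n + 1 : Nat) : Int) := by push_cast; ring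
      have hom' : ∀ m : Nat, m < n + 1 →
          PySem.List.pyGetD (PySem.List.pySetD om (n : Int) ((OmegaN n : Nat) : Int)) (m : Int) 0
            = (OmegaN m : Int) := by
        intro m hm
        rw [PySem.List.pySetD_natCast, PySem.List.pyGetD_natCast, List.getD]
        by_cases hmn : m = n
        · subst hmn
          rw [List.getElem?_set_self (by omega)]
          rfl
        · rw [List.getElem?_set_ne (by omega)]
          have := hval m (by omega)
          rwa [PySem.List.pyGetD_natCast, List.getD] at this
      have hlen' : (PySem.List.pySetD om (n : Int) ((OmegaN n : Nat) : Int)).length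
          = (limit + 1).toNat := by
        rw [PySem.List.pySetD_natCast, List.length_set, hlen]
      by_cases hcond : K ≤ (OmegaN n : Int)
      · rw [if_pos hcond, if_pos hcond]
        by_cases hM : PySem.List.len (acc ++ [(n : Int)]) = M
        · rw [if_pos hM, if_pos hM]
        · rw [if_neg hM, if_neg hM, hrec]
          exact ih (n + 1) _ _ (by omega) (by omega) hlen' hom'
      · rw [if_neg hcond, if_neg hcond, hrec]
        exact ih (n + 1) _ _ (by omega) (by omega) hlen' hom'

-- the freshly built list(range(limit+1)) satisfies the sieve invariant at i = 2
theorem init_range_inv (limit : Int) (hl : 2 ≤ limit) :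
    ∀ j : Nat, j < (PySem.List.pyRange 0 (limit + 1) 1).length →
      PySem.List.pyGetD (PySem.List.pyRange 0 (limit + 1) 1) (j : Int) 0 =
        (if 2 ≤ j ∧ j.minFac < (2:Int).toNat ∧ j.minFac ≠ j then (j.minFac : Int) else (j : Int)) := by
  intro j hj
  rw [PySem.List.length_pyRange_one] at hj
  rw [if_neg (by
    rintro ⟨h2, hlt, -⟩
    have := (Nat.minFac_prime (show j ≠ 1 by omega)).two_le
    omega)]
  have hjlt : j < (PySem.List.pyRange 0 (limit + 1) 1).length := by
    rw [PySem.List.length_pyRange_one]; omega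
  rw [PySem.List.pyGetD_natCast, List.getD, List.getElem?_eq_getElem hjlt,
    PySem.List.getElem_pyRange_one]
  simp

-- a finished scan that already holds exactly M results is unchanged by scanning further
theorem bfALoop_stable (K M : Int) : ∀ (xs ys acc : List Int),
    PySem.List.len acc ≠ M → PySem.List.len (bfALoop K M xs acc) = M →
    bfALoop K M (xs ++ ys) acc = bfALoop K M xs acc := by
  intro xs
  induction xs with
  | nil =>
    intro ys acc hacc hres
    exact absurd hres hacc
  | cons n rest ih =>
    intro ys acc hacc hres
    simp only [List.cons_append, bfALoop]
    simp only [bfALoop] at hres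
    by_cases hc : K ≤ omega_with_mult n
    · simp only [if_pos hc]
      simp only [if_pos hc] at hres
      by_cases hM : PySem.List.len (acc ++ [n]) = M
      · simp only [if_pos hM]
      · simp only [if_neg hM]
        simp only [if_neg hM] at hres
        exact ih ys (acc ++ [n]) hM hres
    · simp only [if_neg hc]
      simp only [if_neg hc] at hres
      exact ih ys acc hacc hres

-- one sieve-and-scan pass agrees with A's scan up to the same bound
theorem sieveScan_eq (K M cap : Int) (hc : 2 ≤ cap) :
    sieveScan K M cap = bfALoop K M (PySem.List.pyRange 2 (cap + 1) 1) [] := by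
  have hsieve := sieveLoop_spec cap 2 (PySem.List.pyRange 0 (cap + 1) 1) (by omega)
    (by rw [PySem.List.length_pyRange_one]; omega)
    (init_range_inv cap hc)
  have h2 : ((2 : Nat) : Int) = (2 : Int) := by norm_num
  unfold sieveScan
  rw [← h2]
  refine (bfLoop_eq K M cap _ hc hsieve ((cap + 1 - 2).toNat) 2 _ [] (by omega) (le_refl _) (by simp) ?_).symm
  intro m hm
  rw [OmegaN_le_one m (by omega), PySem.List.pyGetD_natCast, List.getD]
  rcases h : (List.replicate (cap + 1).toNat (0:Int))[m]? with _ | v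
  · simp
  · have hv : v = 0 := by
      have h2 := h
      rw [List.getElem?_replicate] at h2
      by_cases hcc : m < (cap + 1).toNat
      · simp [hcc] at h2; omega
      · simp [hcc] at h2
    simp [hv]

-- the doubling-cap driver computes A's full scan from any reachable cap
theorem capLoop_eq (K M limit : Int) : ∀ (fuel : Nat) (cap : Int),
    (limit - cap).toNat ≤ fuel → 2 ≤ cap → cap ≤ limit →
    capLoop K M limit cap = bfALoop K M (PySem.List.pyRange 2 (limit + 1) 1) [] := by
  intro fuel
  induction fuel with
  | zero =>
    intro cap hfuel h2 hle
    have heq : cap = limit := by omega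
    rw [capLoop, dif_neg (by rintro ⟨h, -, -⟩; omega)]
    rw [sieveScan_eq K M cap h2, heq]
  | succ fuel ih =>
    intro cap hfuel h2 hle
    by_cases hstop : cap = limit ∨ (0 < M ∧ PySem.List.len (sieveScan K M cap) = M)
    · rw [capLoop, dif_neg (by rintro ⟨-, -, hn⟩; exact hn hstop)]
      rcases hstop with rfl | ⟨hM, hlenM⟩
      · exact sieveScan_eq K M cap h2
      · rw [sieveScan_eq K M cap h2] at hlenM ⊢
        rw [PySem.List.pyRange_one_append 2 (cap + 1) (limit + 1) (by omega) (by omega)]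
        exact (bfALoop_stable K M _ _ [] (by simp [PySem.List.len_eq]; omega) hlenM).symm
    · by_cases hcl : cap = limit
      · exact absurd (Or.inl hcl) hstop
      · rw [capLoop, dif_pos ⟨by omega, by omega, hstop⟩]
        exact ih (min limit (2 * cap)) (by omega) (by omega) (by omega)

-- ===== VERDICT (by name: the statement is the Claim_ definition above) =====
theorem brute_force_factor_rich_spec : Claim_equal_brute_force_factor_rich := by
  intro K M limit _
  unfold Spec_brute_force_factor_rich
  unfold brute_force_factor_rich brute_force_factor_rich_alt
  by_cases hl : limit < 2
  · simp [hl, PySem.List.pyRange_one_eq_nil (by omega : limit + 1 ≤ 2), bfALoop]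
  · have hl' : 2 ≤ limit := by omega
    simp only [if_neg (by omega : ¬ limit < 2)]
    exact (capLoop_eq K M limit (limit - (if limit < 1024 then limit else 1024)).toNat _
      (le_refl _) (by split <;> omega) (by split <;> omega)).symm
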